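-- pv_equiv track=rewrite | github.com/taeyoung0823/Algorithm | 프로그래머스/1/12977. 소수 만들기/소수 만들기.py | solution
-- ===== SOURCE A (Python) =====
-- def prime(num):
--     for i in range(2,num):
--         if num%i==0:
--             return 1
--     return 2
--
-- def solution(nums):
--     answer = 0
--     count = 0
--     for i in range(0,len(nums)-2):
--         for j in range(i+1,len(nums)-1):
--             for k in range(j+1,len(nums)):
--                 answer = nums[i]+nums[j]+nums[k]
--
--                 if prime(answer)==2:
--                     count +=1
--     return count
-- ===== SOURCE B (Python) =====
-- def _sums(k, nums):
--     # list of sums of all k-element combinations of nums, in index order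
--     if k == 0:
--         return [0]
--     if len(nums) < k:
--         return []
--     first, rest = nums[0], nums[1:]
--     return [first + s for s in _sums(k - 1, rest)] + _sums(k, rest)
--
-- def _no_proper_divisor(t):
--     # True iff no d with 2 <= d < t divides t (vacuously true for every t < 4)
--     if t < 4:
--         return True
--     if t % 2 == 0:
--         return False
--     d = 3
--     while d * d <= t:
--         if t % d == 0:
--             return False
--         d += 2
--     return True
--
-- def solution(nums):
--     return sum(1 for s in _sums(3, nums) if _no_proper_divisor(s))
-- ===== Notes on version B (the rewrite author's own statement) =====
-- stated objective: alternative
-- what changed: B tests each triple sum with a parity check plus odd trial division up to sqrt(s) instead of A's trial division over all of 2..s-1, and enumerates the triple sums by recursion on the list (combination sums) instead of three index loops.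
import Mathlib
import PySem

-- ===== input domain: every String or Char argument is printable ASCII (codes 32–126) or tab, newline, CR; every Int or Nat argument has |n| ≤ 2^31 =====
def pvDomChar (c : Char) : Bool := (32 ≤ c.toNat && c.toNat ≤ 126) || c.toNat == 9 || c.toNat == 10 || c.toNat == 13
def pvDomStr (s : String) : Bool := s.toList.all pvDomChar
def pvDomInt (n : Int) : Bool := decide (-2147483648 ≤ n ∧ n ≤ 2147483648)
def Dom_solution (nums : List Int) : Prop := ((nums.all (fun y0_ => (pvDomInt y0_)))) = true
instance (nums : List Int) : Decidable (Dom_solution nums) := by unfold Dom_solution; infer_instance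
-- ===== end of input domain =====

-- B replaces A's per-sum trial division over all of 2..s-1 by a parity check plus odd trial
-- division up to sqrt(s), and enumerates the triple sums by recursion on the list
-- (combination sums) instead of three index loops; return value only, no mutation.

-- ===== PORT A =====
-- for i in range(2, num): if num % i == 0: return 1 / return 2
-- (Python's range is lazy, so the loop is ported as a counter loop: i runs from 2
-- over the (num-2).toNat values of range(2, num); exact for every Int num)
def primeLoop (num : Int) : Nat → Int → Int
  | 0, _ => 2
  | fuel + 1, i => if PySem.Int.mod num i == 0 then 1 else primeLoop num fuel (i + 1)

def prime (num : Int) : Int := primeLoop num (num - 2).toNat 2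

def solution (nums : List Int) : Int :=
  (PySem.List.pyRange 0 ((nums.length : Int) - 2)).foldl (fun count i =>
    (PySem.List.pyRange (i + 1) ((nums.length : Int) - 1)).foldl (fun count j =>
      (PySem.List.pyRange (j + 1) (nums.length : Int)).foldl (fun count k =>
        let answer := PySem.List.pyGetD nums i 0 + PySem.List.pyGetD nums j 0 +
          PySem.List.pyGetD nums k 0
        if prime answer == 2 then count + 1 else count) count) count) 0

-- ===== PORT B =====
-- while d * d <= t: if t % d == 0: return False; d += 2
def noOddDivisorFrom (t d : Nat) : Bool :=
  if h : d * d ≤ t then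
    (if t % d == 0 then false else noOddDivisorFrom t (d + 2))
  else true
termination_by t + 2 - d
decreasing_by
  have hd : d ≤ t := by
    rcases Nat.eq_zero_or_pos d with h0 | h0
    · omega
    · exact le_trans (Nat.le_mul_of_pos_left d h0) h
  omega
-- True iff no d with 2 <= d < t divides t (vacuously true for every t < 4)
def noProperDivisor (t : Int) : Bool :=
  if t < 4 then true
  else if PySem.Int.mod t 2 == 0 then false
  else noOddDivisorFrom t.toNat 3

-- list of sums of all k-element combinations of nums, in index order
def sums : Nat → List Int → List Int
  | 0, _ => [0]
  | k + 1, nums =>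
    if nums.length < k + 1 then []
    else
      match nums with
      | [] => []
      | first :: rest => (sums k rest).map (fun s => first + s) ++ sums (k + 1) rest
termination_by k nums => nums.length


def solution_alt (nums : List Int) : Int :=
  ((sums 3 nums).countP (fun s => noProperDivisor s) : Int)

-- ===== PRECONDITION & SPEC =====
def Spec_solution (nums : List Int) (out : Int) : Prop := out = solution_alt nums
instance (nums : List Int) (out : Int) : Decidable (Spec_solution nums out) := by unfold Spec_solution; infer_instance

-- ===== CLAIM (what is proved, stated in full; the proofs are below) =====
def Claim_equal_solution : Prop := ∀ (nums : List Int), Dom_solution nums → Spec_solution nums (solution nums)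

-- ===== LEMMAS AND PROOFS =====

-- the reference predicate: A's per-sum test, "prime s == 2"
def pA : Int → Bool := fun s => prime s == 2

-- structural counters walking the tails of the list
def tailSum (f : Int → List Int → Int) : List Int → Int
  | [] => 0
  | x :: r => f x r + tailSum f r
def cnt1 (q : Int → Bool) (s : Int) : List Int → Int :=
  tailSum (fun z _ => if q (s + z) then 1 else 0)
def cnt2 (q : Int → Bool) (x : Int) : List Int → Int :=
  tailSum (fun y r => cnt1 q (x + y) r)
def cnt3 (q : Int → Bool) : List Int → Int :=
  tailSum (fun x r => cnt2 q x r)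

lemma cnt2_cons (q : Int → Bool) (x y : Int) (r : List Int) :
    cnt2 q x (y :: r) = cnt1 q (x + y) r + cnt2 q x r := rfl
lemma cnt3_cons (q : Int → Bool) (x : Int) (r : List Int) :
    cnt3 q (x :: r) = cnt2 q x r + cnt3 q r := rfl

lemma sums_one (r : List Int) : sums 1 r = r := by
  induction r with
  | nil => simp [sums]
  | cons x rest ih => simp [sums, ih]

lemma cnt1_eq_countP (q : Int → Bool) (s : Int) (r : List Int) :
    cnt1 q s r = ((r.countP (fun z => q (s + z)) : Nat) : Int) := by
  induction r with
  | nil => simp [cnt1, tailSum]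
  | cons y r ih =>
    simp only [cnt1, tailSum, List.countP_cons] at *
    rw [ih]
    by_cases h : q (s + y) = true <;> simp [h] <;> omega

lemma cnt2_eq_countP (q : Int → Bool) (x : Int) (r : List Int) :
    cnt2 q x r = (((sums 2 r).countP (fun z => q (x + z)) : Nat) : Int) := by
  induction r with
  | nil => simp [cnt2, tailSum, sums]
  | cons y r ih =>
    by_cases h : r.length = 0
    · match r, h with
      | [], _ =>
        have h2 : sums 2 [y] = [] := by rw [sums]; simp
        simp [cnt2_cons, cnt1, cnt2, tailSum, h2]
    · have hguard : ¬ ((y :: r).length < 2) := by simp only [List.length_cons]; omega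
      rw [show sums 2 (y :: r) = (sums 1 r).map (fun s => y + s) ++ sums 2 r by
        rw [sums, if_neg hguard]]
      rw [List.countP_append, List.countP_map, sums_one, cnt2_cons, ih, cnt1_eq_countP]
      push_cast
      congr 2
      apply List.countP_congr
      intro z _
      simp [Function.comp, add_assoc]

lemma cnt3_eq_countP (q : Int → Bool) (l : List Int) :
    cnt3 q l = (((sums 3 l).countP q : Nat) : Int) := by
  induction l with
  | nil => simp [cnt3, tailSum, sums]
  | cons x r ih =>
    by_cases h : r.length < 2
    · have hc2 : cnt2 q x r = 0 := by
        match r, h with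
        | [], _ => simp [cnt2, tailSum]
        | [y], _ => simp [cnt2_cons, cnt1, cnt2, tailSum]
      have hg : (x :: r).length < 3 := by simp only [List.length_cons]; omega
      have hs : sums 3 (x :: r) = [] := by rw [sums, if_pos hg]
      have hsr : sums 3 r = [] := by
        match r, h with
        | [], _ => rw [sums, if_pos (by simp)]
        | [a], _ => rw [sums, if_pos (by simp)]
      have hc3 : cnt3 q r = 0 := by rw [ih, hsr]; simp
      rw [cnt3_cons, hc2, hc3, hs]; simp
    · have hguard : ¬ ((x :: r).length < 3) := by simp only [List.length_cons]; omega
      rw [show sums 3 (x :: r) = (sums 2 r).map (fun s => x + s) ++ sums 3 r by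
        rw [sums, if_neg hguard]]
      rw [List.countP_append, List.countP_map, cnt3_cons, ih, cnt2_eq_countP]
      push_cast
      rfl

lemma cnt2_short (q : Int → Bool) (x : Int) (r : List Int) (h : r.length ≤ 1) :
    cnt2 q x r = 0 := by
  match r, h with
  | [], _ => simp [cnt2, tailSum]
  | [y], _ => simp [cnt2_cons, cnt1, cnt2, tailSum]

lemma sum_pyRange_tailSum (f : Int → List Int → Int) :
    ∀ (fuel : Nat) (l : List Int) (a : Nat), l.length - a ≤ fuel →
    ((PySem.List.pyRange (a : Int) (l.length : Int)).map
        (fun j => f (PySem.List.pyGetD l j 0) (l.drop (j.toNat + 1)))).sum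
      = tailSum f (l.drop a) := by
  intro fuel
  induction fuel with
  | zero =>
    intro l a h
    have ha : l.length ≤ a := by omega
    rw [PySem.List.pyRange_one_eq_nil (by exact_mod_cast ha), List.drop_eq_nil_of_le ha]
    simp [tailSum]
  | succ fuel ih =>
    intro l a h
    by_cases hlt : a < l.length
    · rw [PySem.List.pyRange_one_cons (by exact_mod_cast hlt)]
      rw [List.map_cons, List.sum_cons]
      have e1 : PySem.List.pyGetD l (a : Int) 0 = l[a] := by
        rw [PySem.List.pyGetD_natCast]
        exact List.getD_eq_getElem l 0 hlt
      have e2 : ((a : Int) + 1) = ((a + 1 : Nat) : Int) := by push_cast; ring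
      rw [e1, e2, ih l (a + 1) (by omega)]
      rw [List.drop_eq_getElem_cons hlt, tailSum]
      simp
    · have ha : l.length ≤ a := by omega
      rw [PySem.List.pyRange_one_eq_nil (by exact_mod_cast ha), List.drop_eq_nil_of_le ha]
      simp [tailSum]

def g3 (l : List Int) (i j : Int) : Int :=
  (((PySem.List.pyRange (j + 1) (l.length : Int)).countP
    (fun k => prime (PySem.List.pyGetD l i 0 + PySem.List.pyGetD l j 0 +
      PySem.List.pyGetD l k 0) == 2) : Nat) : Int)
def g2 (l : List Int) (i : Int) : Int :=
  ((PySem.List.pyRange (i + 1) ((l.length : Int) - 1)).map (g3 l i)).sum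

lemma solution_eq_sum (l : List Int) :
    solution l = ((PySem.List.pyRange 0 ((l.length : Int) - 2)).map (g2 l)).sum := by
  unfold solution
  rw [PySem.List.foldl_congr_mem _ _ (fun count i => count + g2 l i) 0 ?_]
  · rw [PySem.List.foldl_add]; simp
  · intro c i _
    unfold g2
    rw [PySem.List.foldl_congr_mem _ _ (fun count j => count + g3 l i j) c ?_]
    · rw [PySem.List.foldl_add]
    · intro c' j _
      unfold g3
      rw [PySem.List.foldl_if_add_one]

lemma g3_eq (l : List Int) (i j : Int) (hj : 0 ≤ j) :
    g3 l i j = cnt1 pA (PySem.List.pyGetD l i 0 + PySem.List.pyGetD l j 0)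
      (l.drop (j.toNat + 1)) := by
  unfold g3
  rw [← PySem.List.sum_map_ite_one_zero]
  have hcast : j + 1 = ((j.toNat + 1 : Nat) : Int) := by omega
  rw [hcast]
  have := sum_pyRange_tailSum
    (fun z _ => if pA (PySem.List.pyGetD l i 0 + PySem.List.pyGetD l j 0 + z) then 1 else 0)
    l.length l (j.toNat + 1) (by omega)
  exact this

lemma g2_eq (l : List Int) (i : Int) (hi : 0 ≤ i) (hilen : i + 1 ≤ (l.length : Int)) :
    g2 l i = cnt2 pA (PySem.List.pyGetD l i 0) (l.drop (i.toNat + 1)) := by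
  by_cases hedge : i + 1 ≤ (l.length : Int) - 1
  · unfold g2
    -- extend the range from l.length - 1 up to l.length; the extra term is 0
    have hsplit : PySem.List.pyRange (i + 1) (l.length : Int)
        = PySem.List.pyRange (i + 1) ((l.length : Int) - 1) ++ [(l.length : Int) - 1] := by
      have h' : (l.length : Int) = ((l.length : Int) - 1) + 1 := by ring
      rw [h', PySem.List.pyRange_one_succ_right (by omega)]
      ring_nf
    have hzero : g3 l i ((l.length : Int) - 1) = 0 := by
      rw [g3_eq l i _ (by omega),
        List.drop_eq_nil_of_le (by omega : l.length ≤ ((l.length : Int) - 1).toNat + 1)]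
      rfl
    have hmap : ((PySem.List.pyRange (i + 1) (l.length : Int)).map (g3 l i)).sum
        = ((PySem.List.pyRange (i + 1) ((l.length : Int) - 1)).map (g3 l i)).sum := by
      rw [hsplit]; simp [hzero]
    rw [← hmap]
    have hmem : ∀ j ∈ PySem.List.pyRange (i + 1) (l.length : Int),
        g3 l i j = (fun j => cnt1 pA (PySem.List.pyGetD l i 0 + PySem.List.pyGetD l j 0)
          (l.drop (j.toNat + 1))) j := by
      intro j hjmem
      have := PySem.List.mem_pyRange_one.mp hjmem
      exact g3_eq l i j (by omega)
    rw [List.map_congr_left hmem]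
    have hcast : i + 1 = ((i.toNat + 1 : Nat) : Int) := by omega
    rw [hcast]
    exact sum_pyRange_tailSum (fun y r => cnt1 pA (PySem.List.pyGetD l i 0 + y) r)
      l.length l (i.toNat + 1) (by omega)
  · -- i + 1 = l.length: the j-range is empty and the tail has no pair either
    have hi1 : i + 1 = (l.length : Int) := by omega
    unfold g2
    rw [PySem.List.pyRange_one_eq_nil (by omega)]
    rw [cnt2_short pA _ _ (by simp; omega)]
    rfl

lemma solution_eq_cnt3 (l : List Int) (h3 : 3 ≤ l.length) :
    solution l = cnt3 pA l := by
  rw [solution_eq_sum]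
  -- extend the outer range from l.length - 2 to l.length; the two extra terms are 0
  have hsplit2 : PySem.List.pyRange 0 ((l.length : Int) - 1)
      = PySem.List.pyRange 0 ((l.length : Int) - 2) ++ [(l.length : Int) - 2] := by
    have : (l.length : Int) - 1 = ((l.length : Int) - 2) + 1 := by ring
    rw [this, PySem.List.pyRange_one_succ_right (by omega)]
  have hsplit1 : PySem.List.pyRange 0 (l.length : Int)
      = PySem.List.pyRange 0 ((l.length : Int) - 1) ++ [(l.length : Int) - 1] := by
    have : (l.length : Int) = ((l.length : Int) - 1) + 1 := by ring
    rw [this, PySem.List.pyRange_one_succ_right (by omega)]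
    ring_nf
  have hz1 : g2 l ((l.length : Int) - 1) = 0 := by
    rw [g2_eq l _ (by omega) (by omega)]
    apply cnt2_short
    simp
    omega
  have hz2 : g2 l ((l.length : Int) - 2) = 0 := by
    rw [g2_eq l _ (by omega) (by omega)]
    apply cnt2_short
    simp
    omega
  have hext : ((PySem.List.pyRange 0 ((l.length : Int) - 2)).map (g2 l)).sum
      = ((PySem.List.pyRange 0 (l.length : Int)).map (g2 l)).sum := by
    rw [hsplit1, hsplit2]
    simp [hz1, hz2]
  rw [hext]
  have hmem : ∀ i ∈ PySem.List.pyRange 0 (l.length : Int),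
      g2 l i = (fun i => cnt2 pA (PySem.List.pyGetD l i 0) (l.drop (i.toNat + 1))) i := by
    intro i himem
    have hb := PySem.List.mem_pyRange_one.mp himem
    exact g2_eq l i hb.1 (by omega)
  rw [List.map_congr_left hmem]
  exact sum_pyRange_tailSum (fun x r => cnt2 pA x r) l.length l 0 (by omega)

lemma primeLoop_eq_two_iff (num : Int) : ∀ (fuel : Nat) (i : Int),
    (primeLoop num fuel i == 2) = true ↔ ∀ j : Nat, j < fuel → ¬ (i + (j : Int)) ∣ num := by
  intro fuel
  induction fuel with
  | zero => intro i; simp [primeLoop]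
  | succ fuel ih =>
    intro i
    rw [primeLoop]
    by_cases h : (PySem.Int.mod num i == 0) = true
    · rw [if_pos h]
      constructor
      · intro hh; exact absurd hh (by simp)
      · intro hall
        exfalso
        have hd : i ∣ num := (PySem.Int.mod_eq_zero_iff_dvd num i).mp (by simpa using h)
        have h0 := hall 0 (by omega)
        simp at h0
        exact h0 hd
    · rw [if_neg h]
      rw [ih (i + 1)]
      constructor
      · intro hall j hj
        match j with
        | 0 =>
          simp only [Nat.cast_zero, add_zero]
          intro hdvd
          exact h (by simpa using (PySem.Int.mod_eq_zero_iff_dvd num i).mpr hdvd)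
        | j' + 1 =>
          have hthis := hall j' (by omega)
          have hc : i + 1 + (j' : Int) = i + ((j' + 1 : Nat) : Int) := by push_cast; ring
          rw [hc] at hthis
          exact hthis
      · intro hall j hj
        have hthis := hall (j + 1) (by omega)
        have hc : i + 1 + (j : Int) = i + ((j + 1 : Nat) : Int) := by push_cast; ring
        rw [hc]
        exact hthis

lemma prime_eq_two_iff (s : Int) :
    (prime s == 2) = true ↔ ∀ i : Int, 2 ≤ i → i < s → ¬ i ∣ s := by
  unfold prime
  rw [primeLoop_eq_two_iff]
  constructor
  · intro hall i h2 hi hdvd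
    have hthis := hall (i - 2).toNat (by omega)
    rw [show (2 : Int) + ((i - 2).toNat : Int) = i by omega] at hthis
    exact hthis hdvd
  · intro hall j hj
    exact hall (2 + (j : Int)) (by omega) (by omega)

lemma noOddDivisorFrom_iff (t d : Nat) :
    noOddDivisorFrom t d = true ↔
      ∀ j : Nat, (d + 2 * j) * (d + 2 * j) ≤ t → ¬ (d + 2 * j) ∣ t := by
  induction d using noOddDivisorFrom.induct t with
  | case1 d h heq =>
    rw [noOddDivisorFrom, dif_pos h, if_pos heq]
    constructor
    · intro hh; exact absurd hh (by simp)
    · intro hall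
      exfalso
      have hd : d ∣ t := Nat.dvd_of_mod_eq_zero (by simpa using heq)
      have := hall 0 (by simpa using h)
      simp at this
      exact this hd
  | case2 d h heq ih =>
    rw [noOddDivisorFrom, dif_pos h, if_neg heq, ih]
    constructor
    · intro hall j hsq
      match j with
      | 0 =>
        intro hdvd
        exact heq (by simpa using Nat.mod_eq_zero_of_dvd (by simpa using hdvd))
      | j' + 1 =>
        have hEq : d + 2 + 2 * j' = d + 2 * (j' + 1) := by omega
        have := hall j' (by rw [hEq]; exact hsq)
        rw [hEq] at this
        exact this
    · intro hall j hsq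
      have hEq : d + 2 + 2 * j = d + 2 * (j + 1) := by omega
      have := hall (j + 1) (by rw [← hEq]; exact hsq)
      rw [← hEq] at this
      exact this
  | case3 d h =>
    rw [noOddDivisorFrom, dif_neg h]
    simp only [true_iff]
    intro j hsq
    exfalso
    have : d * d ≤ (d + 2 * j) * (d + 2 * j) :=
      Nat.mul_le_mul (by omega) (by omega)
    omega

lemma nat_bridge (n : Nat) (h4 : 4 ≤ n) (h2 : ¬ 2 ∣ n) :
    (∀ j : Nat, (3 + 2 * j) * (3 + 2 * j) ≤ n → ¬ (3 + 2 * j) ∣ n) ↔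
      (∀ m : Nat, 2 ≤ m → m < n → ¬ m ∣ n) := by
  constructor
  · intro hall m hm2 hmn hdvd
    have hnp : ¬ n.Prime := by
      intro hp
      rcases hp.eq_one_or_self_of_dvd m hdvd with h1 | h1 <;> omega
    have hq := Nat.minFac_prime (show n ≠ 1 by omega)
    have hqd : n.minFac ∣ n := Nat.minFac_dvd n
    have hqsq : n.minFac ^ 2 ≤ n := Nat.minFac_sq_le_self (by omega) hnp
    have hqsq' : n.minFac * n.minFac ≤ n := by nlinarith [hqsq]
    have hq2 : n.minFac ≠ 2 := by
      intro h; rw [h] at hqd; exact h2 hqd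
    have hodd : Odd n.minFac := hq.odd_of_ne_two hq2
    have h2le := hq.two_le
    obtain ⟨k, hk⟩ := hodd
    have hj : n.minFac = 3 + 2 * (k - 1) := by omega
    exact hall (k - 1) (by rw [← hj]; exact hqsq') (by rw [← hj]; exact hqd)
  · intro hall j hsq hdvd
    have hlt : 3 + 2 * j < n := by nlinarith
    exact hall _ (by omega) hlt hdvd

lemma pred_eq : pA = noProperDivisor := by
  funext s
  rw [Bool.eq_iff_iff, show pA s = (prime s == 2) from rfl, prime_eq_two_iff]
  unfold noProperDivisor
  by_cases h4 : s < 4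
  · rw [if_pos h4]
    constructor
    · intro _; rfl
    · intro _ i h2 hi hdvd
      have hi2 : i = 2 ∧ s = 3 := by omega
      obtain ⟨rfl, rfl⟩ := hi2
      revert hdvd
      decide
  · rw [if_neg h4]
    push_neg at h4
    by_cases h2 : (PySem.Int.mod s 2 == 0) = true
    · rw [if_pos h2]
      have h2' : (2 : Int) ∣ s := (PySem.Int.mod_eq_zero_iff_dvd s 2).mp (by simpa using h2)
      constructor
      · intro hall; exact absurd h2' (hall 2 (by omega) (by omega))
      · intro hh; exact absurd hh (by simp)
    · rw [if_neg (by simpa using h2)]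
      have hs : s = (s.toNat : Int) := by omega
      have hn4 : 4 ≤ s.toNat := by omega
      have h2n : ¬ 2 ∣ s.toNat := by
        intro hd
        have : (2 : Int) ∣ s := by rw [hs]; exact_mod_cast hd
        exact h2 (by simpa using (PySem.Int.mod_eq_zero_iff_dvd s 2).mpr this)
      rw [noOddDivisorFrom_iff, nat_bridge s.toNat hn4 h2n]
      constructor
      · intro hall m hm2 hmn hdvd
        refine hall (m : Int) (by omega) (by omega) ?_
        rw [hs]
        exact_mod_cast hdvd
      · intro hall i h2i his hdvd
        refine hall i.toNat (by omega) (by omega) ?_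
        have hi : i = (i.toNat : Int) := by omega
        rw [hi, hs] at hdvd
        exact_mod_cast hdvd


lemma sums3_nil_of_short (l : List Int) (h : l.length < 3) : sums 3 l = [] := by
  match l, h with
  | [], _ => rw [sums, if_pos (by simp)]
  | [a], _ => rw [sums, if_pos (by simp)]
  | [a, b], _ => rw [sums, if_pos (by simp)]

lemma main_eq (l : List Int) : solution l = solution_alt l := by
  by_cases h3 : 3 ≤ l.length
  · rw [solution_eq_cnt3 l h3, pred_eq, cnt3_eq_countP]
    rfl
  · have hA : solution l = 0 := by
      unfold solution
      rw [PySem.List.pyRange_one_eq_nil (by omega : (l.length : Int) - 2 ≤ 0)]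
      rfl
    have hB : solution_alt l = 0 := by
      unfold solution_alt
      rw [sums3_nil_of_short l (by omega)]
      rfl
    rw [hA, hB]

-- ===== VERDICT (by name: the statement is the Claim_ definition above) =====
theorem solution_spec : Claim_equal_solution := by
  intro nums _
  unfold Spec_solution
  exact main_eq nums
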